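-- pv_equiv track=rewrite | github.com/jplozgom/interview_prep | course_dependency.py | findCourseList
-- ===== SOURCE A (Python) =====
-- def findCourseList(courses, courseCode, memory, level, courseListPerLevel):
--
--     if courseCode in memory:
--         return memory[courseCode]
--
--     maxLevel = level
--     if len(courses[courseCode]) > 0:
--         for depCourseCode in courses[courseCode]:
--             maxLevel = max(maxLevel, findCourseList(courses, depCourseCode, memory, level + 1, courseListPerLevel))
--
--     if level not in courseListPerLevel:
--         courseListPerLevel[level] = []
--
--     courseListPerLevel[level].append(courseCode)
--     memory[courseCode] = maxLevel
--     return maxLevel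
-- ===== SOURCE B (Python) =====
-- def findCourseList(courses, courseCode, memory, level, courseListPerLevel):
--     # Explicit-stack DFS (two-phase enter/exit frames) instead of recursion.
--     # Mutates memory and courseListPerLevel exactly like the recursive version.
--     stack = [(True, courseCode, level)]
--     while stack:
--         enter, c, lvl = stack.pop()
--         if enter:
--             if c in memory:
--                 continue
--             stack.append((False, c, lvl))
--             for d in reversed(courses[c]):
--                 stack.append((True, d, lvl + 1))
--         else:
--             m = lvl
--             for d in courses[c]:
--                 m = max(m, memory[d])
--             if lvl not in courseListPerLevel:
--                 courseListPerLevel[lvl] = []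
--             courseListPerLevel[lvl].append(c)
--             memory[c] = m
--     return memory[courseCode]
-- ===== Notes on version B (the rewrite author's own statement) =====
-- stated objective: alternative
-- what changed: The recursive memoized DFS is replaced by an iterative explicit-stack traversal with two-phase enter/exit frames; post-order results are recomputed at exit time from the memo entries of the dependencies instead of from recursive return values.
import Mathlib
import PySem

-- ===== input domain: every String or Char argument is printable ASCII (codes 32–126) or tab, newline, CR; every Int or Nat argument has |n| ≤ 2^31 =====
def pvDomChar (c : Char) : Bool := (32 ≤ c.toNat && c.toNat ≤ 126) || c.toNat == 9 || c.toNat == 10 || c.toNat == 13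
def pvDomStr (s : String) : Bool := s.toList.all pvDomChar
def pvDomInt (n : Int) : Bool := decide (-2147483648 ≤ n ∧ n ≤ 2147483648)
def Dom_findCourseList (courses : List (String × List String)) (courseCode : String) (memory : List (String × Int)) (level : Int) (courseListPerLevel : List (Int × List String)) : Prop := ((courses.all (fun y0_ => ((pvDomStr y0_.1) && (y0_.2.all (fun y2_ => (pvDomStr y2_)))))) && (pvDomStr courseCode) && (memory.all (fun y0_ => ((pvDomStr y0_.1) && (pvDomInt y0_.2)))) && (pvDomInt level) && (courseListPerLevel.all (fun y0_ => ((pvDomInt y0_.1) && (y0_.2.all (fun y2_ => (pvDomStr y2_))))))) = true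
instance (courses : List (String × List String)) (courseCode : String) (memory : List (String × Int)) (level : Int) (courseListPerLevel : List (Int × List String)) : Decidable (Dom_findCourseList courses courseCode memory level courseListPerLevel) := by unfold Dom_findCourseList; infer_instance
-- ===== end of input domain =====

-- B replaces A's recursion by an explicit two-phase (enter/exit) stack DFS; in Python B performs the
-- same dict mutations as A, but the equivalence proved here is about the RETURN value only
-- (both ports thread the dicts functionally).

-- ===== PORT A =====
-- The Python for-loop over the dependencies, as structural recursion over the same state
-- (accumulated maxLevel, memory, courseListPerLevel); `go` is the recursive call at the next fuel.
def pvGoAFold (go : String → Int → PySem.Dict String Int → PySem.Dict Int (List String) → Option (Int × PySem.Dict String Int × PySem.Dict Int (List String))) :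
    List String → Int → Int → PySem.Dict String Int → PySem.Dict Int (List String) → Option (Int × PySem.Dict String Int × PySem.Dict Int (List String))
  | [], _, m, mem, clpl => some (m, mem, clpl)
  | d :: rest, lvl, m, mem, clpl =>
    match go d (lvl + 1) mem clpl with
    | none => none
    | some (v, mem', clpl') => pvGoAFold go rest lvl (max m v) mem' clpl'

-- A's recursion, fuel = recursion-depth guard only (Pre_ guarantees it is never exhausted);
-- `none` is exactly where Python raises (KeyError on courses[c], or the fuel/recursion guard).
def pvGoA (cd : PySem.Dict String (List String)) :
    Nat → String → Int → PySem.Dict String Int → PySem.Dict Int (List String) → Option (Int × PySem.Dict String Int × PySem.Dict Int (List String))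
  | 0, _, _, _, _ => none
  | f + 1, c, lvl, mem, clpl =>
    match PySem.Dict.get? mem c with
    | some v => some (v, mem, clpl)                       -- if courseCode in memory: return memory[courseCode]
    | none =>
      match PySem.Dict.get? cd c with
      | none => none                                      -- KeyError: courses[courseCode]
      | some ds =>
        match (if 0 < ds.length then pvGoAFold (pvGoA cd f) ds lvl lvl mem clpl else some (lvl, mem, clpl)) with
        | none => none
        | some (m, mem1, clpl1) =>
          let clpl2 := if PySem.Dict.contains clpl1 lvl then clpl1 else PySem.Dict.insert clpl1 lvl []
          some (m, PySem.Dict.insert mem1 c m, PySem.Dict.modify clpl2 lvl [] (fun l => l ++ [c]))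

def findCourseList (courses : List (String × List String)) (courseCode : String) (memory : List (String × Int)) (level : Int) (courseListPerLevel : List (Int × List String)) : Int :=
  match pvGoA (PySem.Dict.ofList courses) (courses.length + 1) courseCode level (PySem.Dict.ofList memory) (PySem.Dict.ofList courseListPerLevel) with
  | some (v, _, _) => v
  | none => 0

-- ===== PORT B =====
inductive PvFrame where
  | enter : String → Int → PvFrame
  | exits : String → Int → PvFrame
  deriving DecidableEq, Repr

-- Source B's exit-phase loop `m = lvl; for d in courses[c]: m = max(m, memory[d])`
-- (none = KeyError on memory[d])
def pvExitMax (mem : PySem.Dict String Int) : List String → Int → Option Int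
  | [], m => some m
  | d :: rest, m =>
    match PySem.Dict.get? mem d with
    | none => none
    | some v => pvExitMax mem rest (max m v)

-- Source B's while-loop over the explicit stack (head of the list = top of the stack; Source B pushes the
-- dependencies reversed, so popping yields them left to right = `ds.map … ++ …` here).
-- fuel is a totality guard only; the port's fuel below is large enough whenever Pre_ holds.
def pvRunB (cd : PySem.Dict String (List String)) (f : Nat) (S : List PvFrame) (mem : PySem.Dict String Int) (clpl : PySem.Dict Int (List String)) : Option (PySem.Dict String Int × PySem.Dict Int (List String)) :=
  match S with
  | [] => some (mem, clpl)
  | fr :: S' =>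
    match f with
    | 0 => none
    | f + 1 =>
      match fr with
      | PvFrame.enter c lvl =>
        if PySem.Dict.contains mem c then pvRunB cd f S' mem clpl
        else
          match PySem.Dict.get? cd c with
          | none => none
          | some ds => pvRunB cd f (ds.map (fun d => PvFrame.enter d (lvl + 1)) ++ PvFrame.exits c lvl :: S') mem clpl
      | PvFrame.exits c lvl =>
        match PySem.Dict.get? cd c with
        | none => none
        | some ds =>
          match pvExitMax mem ds lvl with
          | none => none
          | some m =>
            let clpl2 := if PySem.Dict.contains clpl lvl then clpl else PySem.Dict.insert clpl lvl []
            pvRunB cd f S' (PySem.Dict.insert mem c m) (PySem.Dict.modify clpl2 lvl [] (fun l => l ++ [c]))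

-- an upper bound on the length of any dependency list stored in the dict (for the fuel guard)
def pvDMax (cd : PySem.Dict String (List String)) : Nat :=
  cd.items.foldl (fun a p => max a p.2.length) 0

def findCourseList_alt (courses : List (String × List String)) (courseCode : String) (memory : List (String × Int)) (level : Int) (courseListPerLevel : List (Int × List String)) : Int :=
  match pvRunB (PySem.Dict.ofList courses) ((pvDMax (PySem.Dict.ofList courses) + 2) ^ (courses.length + 1)) [PvFrame.enter courseCode level] (PySem.Dict.ofList memory) (PySem.Dict.ofList courseListPerLevel) with
  | some (memF, _) => PySem.Dict.getD memF courseCode 0   -- return memory[courseCode] (present whenever the loop completed)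
  | none => 0

-- ===== PRECONDITION & SPEC =====
-- Pre_ excludes exactly the inputs on which Python A raises: a KeyError (a course needed for the
-- traversal is not a key of courses) or unbounded recursion (a reachable dependency cycle).
-- It is stated as a shape condition on the input graph: pvSafe is the monotone closure of the
-- evidently-resolvable courses (a course is safe if it is already in memory, or it is a key of
-- courses and all its dependencies are already safe); courses.length + 1 closure rounds reach the
-- fixpoint, because safe courses on a dependency chain are distinct keys of courses.  pvSafe
-- inspects only the input dicts (no levels, no memo values, no traversal state).
def pvSafe (cd : PySem.Dict String (List String)) (mem0 : PySem.Dict String Int) : Nat → List String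
  | 0 => []
  | i + 1 =>
    let S := pvSafe cd mem0 i
    (mem0.keys ++ cd.keys).filter
      (fun c => PySem.Dict.contains mem0 c || (PySem.Dict.getD cd c []).all (fun d => S.contains d))

def Pre_findCourseList (courses : List (String × List String)) (courseCode : String) (memory : List (String × Int)) (level : Int) (courseListPerLevel : List (Int × List String)) : Prop :=
  (pvSafe (PySem.Dict.ofList courses) (PySem.Dict.ofList memory) (courses.length + 1)).contains courseCode = true
instance (courses : List (String × List String)) (courseCode : String) (memory : List (String × Int)) (level : Int) (courseListPerLevel : List (Int × List String)) : Decidable (Pre_findCourseList courses courseCode memory level courseListPerLevel) := by unfold Pre_findCourseList; infer_instance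

def pvWitness_findCourseList : (List (String × List String)) × String × (List (String × Int)) × Int × (List (Int × List String)) :=
  ([("a", ["b", "c"]), ("b", ["c"]), ("c", [])], "a", [("d", 5)], 0, [])

def Spec_findCourseList (courses : List (String × List String)) (courseCode : String) (memory : List (String × Int)) (level : Int) (courseListPerLevel : List (Int × List String)) (out : Int) : Prop := out = findCourseList_alt courses courseCode memory level courseListPerLevel
instance (courses : List (String × List String)) (courseCode : String) (memory : List (String × Int)) (level : Int) (courseListPerLevel : List (Int × List String)) (out : Int) : Decidable (Spec_findCourseList courses courseCode memory level courseListPerLevel out) := by unfold Spec_findCourseList; infer_instance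

-- ===== CLAIM (what is proved, stated in full; the proofs are below) =====
def Claim_equal_findCourseList : Prop := ∀ (courses : List (String × List String)) (courseCode : String) (memory : List (String × Int)) (level : Int) (courseListPerLevel : List (Int × List String)), Dom_findCourseList courses courseCode memory level courseListPerLevel → Pre_findCourseList courses courseCode memory level courseListPerLevel → Spec_findCourseList courses courseCode memory level courseListPerLevel (findCourseList courses courseCode memory level courseListPerLevel)

-- ===== LEMMAS AND PROOFS =====

-- memory only grows, and an entry once written is never overwritten
def pvPres (m m' : PySem.Dict String Int) : Prop :=
  ∀ x w, PySem.Dict.get? m x = some w → PySem.Dict.get? m' x = some w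

theorem pvPres_refl (m : PySem.Dict String Int) : pvPres m m := fun _ _ h => h

theorem pvRunB_nil (cd : PySem.Dict String (List String)) (f : Nat) (mem : PySem.Dict String Int) (clpl : PySem.Dict Int (List String)) :
    pvRunB cd f [] mem clpl = some (mem, clpl) := by
  simp [pvRunB]

theorem pvRunB_enter (cd : PySem.Dict String (List String)) (f : Nat) (c : String) (lvl : Int) (S : List PvFrame) (mem : PySem.Dict String Int) (clpl : PySem.Dict Int (List String)) :
    pvRunB cd (f + 1) (PvFrame.enter c lvl :: S) mem clpl =
      if PySem.Dict.contains mem c then pvRunB cd f S mem clpl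
      else
        match PySem.Dict.get? cd c with
        | none => none
        | some ds => pvRunB cd f (ds.map (fun d => PvFrame.enter d (lvl + 1)) ++ PvFrame.exits c lvl :: S) mem clpl := by
  simp [pvRunB]

theorem pvRunB_exit (cd : PySem.Dict String (List String)) (f : Nat) (c : String) (lvl : Int) (S : List PvFrame) (mem : PySem.Dict String Int) (clpl : PySem.Dict Int (List String)) :
    pvRunB cd (f + 1) (PvFrame.exits c lvl :: S) mem clpl =
      match PySem.Dict.get? cd c with
      | none => none
      | some ds =>
        match pvExitMax mem ds lvl with
        | none => none
        | some m =>
          pvRunB cd f S (PySem.Dict.insert mem c m) (PySem.Dict.modify (if PySem.Dict.contains clpl lvl then clpl else PySem.Dict.insert clpl lvl []) lvl [] (fun l => l ++ [c])) := by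
  simp [pvRunB]

theorem pvGuard (go : String → Int → PySem.Dict String Int → PySem.Dict Int (List String) → Option (Int × PySem.Dict String Int × PySem.Dict Int (List String))) (ds : List String) (lvl : Int) (mem : PySem.Dict String Int) (clpl : PySem.Dict Int (List String)) :
    (if 0 < ds.length then pvGoAFold go ds lvl lvl mem clpl else some (lvl, mem, clpl)) = pvGoAFold go ds lvl lvl mem clpl := by
  cases ds <;> simp [pvGoAFold]

-- the simulation of one for-loop of A by the corresponding stretch of B's stack loop
theorem pvSimFold (cd : PySem.Dict String (List String)) (K : Nat)
    (g : String → Int → PySem.Dict String Int → PySem.Dict Int (List String) → Option (Int × PySem.Dict String Int × PySem.Dict Int (List String)))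
    (hg : ∀ d lvl mem clpl v mem' clpl', g d lvl mem clpl = some (v, mem', clpl') →
      PySem.Dict.get? mem' d = some v ∧ pvPres mem mem' ∧
      ∃ k, 0 < k ∧ k ≤ K ∧ ∀ fB S, pvRunB cd (fB + k) (PvFrame.enter d lvl :: S) mem clpl = pvRunB cd fB S mem' clpl') :
    ∀ (ds : List String) (lvl m0 : Int) mem clpl m mem1 clpl1,
      pvGoAFold g ds lvl m0 mem clpl = some (m, mem1, clpl1) →
      pvPres mem mem1 ∧
      (∀ memF, pvPres mem1 memF → pvExitMax memF ds m0 = some m) ∧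
      ∃ k, k ≤ ds.length * K ∧ ∀ fB S, pvRunB cd (fB + k) (ds.map (fun d => PvFrame.enter d (lvl + 1)) ++ S) mem clpl = pvRunB cd fB S mem1 clpl1 := by
  intro ds
  induction ds with
  | nil =>
    intro lvl m0 mem clpl m mem1 clpl1 h
    simp only [pvGoAFold, Option.some.injEq, Prod.mk.injEq] at h
    obtain ⟨rfl, rfl, rfl⟩ := h
    refine ⟨pvPres_refl _, fun memF _ => rfl, 0, by omega, fun fB S => by simp⟩
  | cons d rest ih =>
    intro lvl m0 mem clpl m mem1 clpl1 h
    rw [pvGoAFold] at h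
    rcases hgd : g d (lvl + 1) mem clpl with _ | ⟨vd, memd, clpld⟩ <;> rw [hgd] at h
    · exact absurd h (by simp)
    · obtain ⟨hd1, hd2, kd, hkd0, hkdK, hchaind⟩ := hg _ _ _ _ _ _ _ hgd
      obtain ⟨hr1, hr2, kr, hkrK, hchainr⟩ := ih lvl (max m0 vd) memd clpld m mem1 clpl1 h
      refine ⟨fun x w hx => hr1 _ _ (hd2 _ _ hx), ?_, kd + kr, ?_, ?_⟩
      · intro memF hpF
        have hdF : PySem.Dict.get? memF d = some vd := hpF _ _ (hr1 _ _ hd1)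
        rw [pvExitMax, hdF]
        exact hr2 memF hpF
      · have h1 : kd + kr ≤ K + rest.length * K := by omega
        calc kd + kr ≤ K + rest.length * K := h1
          _ = (d :: rest).length * K := by rw [List.length_cons, Nat.succ_mul, Nat.add_comm]
      · intro fB S
        have e : fB + (kd + kr) = (fB + kr) + kd := by omega
        have hstack : (d :: rest).map (fun d => PvFrame.enter d (lvl + 1)) ++ S
            = PvFrame.enter d (lvl + 1) :: (rest.map (fun d => PvFrame.enter d (lvl + 1)) ++ S) := by simp
        rw [e, hstack, hchaind (fB + kr) _, hchainr fB S]

-- A's recursion is simulated by B's stack machine, the returned value is the final memo entry,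
-- and memory entries are preserved
theorem pvSimGo (cd : PySem.Dict String (List String)) (D : Nat)
    (hD : ∀ c ds, PySem.Dict.get? cd c = some ds → ds.length ≤ D) :
    ∀ (f : Nat) (c : String) (lvl : Int) mem clpl v mem' clpl',
      pvGoA cd f c lvl mem clpl = some (v, mem', clpl') →
      PySem.Dict.get? mem' c = some v ∧ pvPres mem mem' ∧
      ∃ k, 0 < k ∧ k ≤ (D + 2) ^ f ∧ ∀ fB S, pvRunB cd (fB + k) (PvFrame.enter c lvl :: S) mem clpl = pvRunB cd fB S mem' clpl' := by
  intro f
  induction f with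
  | zero =>
    intro c lvl mem clpl v mem' clpl' h
    exact absurd h (by simp [pvGoA])
  | succ f ihf =>
    intro c lvl mem clpl v mem' clpl' h
    rw [pvGoA] at h
    rcases hmc : PySem.Dict.get? mem c with _ | v0 <;> rw [hmc] at h <;> dsimp only at h
    · rcases hcd : PySem.Dict.get? cd c with _ | ds <;> rw [hcd] at h <;> dsimp only at h
      · exact absurd h (by simp)
      · rw [pvGuard] at h
        rcases hF : pvGoAFold (pvGoA cd f) ds lvl lvl mem clpl with _ | ⟨m1, mem1, clpl1⟩ <;> rw [hF] at h
        · exact absurd h (by simp)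
        · simp only [Option.some.injEq, Prod.mk.injEq] at h
          obtain ⟨rfl, rfl, rfl⟩ := h
          obtain ⟨presF, exitF, kF, hkFb, chainF⟩ := pvSimFold cd ((D + 2) ^ f) (pvGoA cd f) ihf ds lvl lvl mem clpl m1 mem1 clpl1 hF
          refine ⟨PySem.Dict.get?_insert_self _ _ _, ?_, kF + 2, by omega, ?_, ?_⟩
          · intro x w hx
            have hxne : x ≠ c := by
              intro e; rw [e, hmc] at hx; cases hx
            rw [PySem.Dict.get?_insert_of_ne _ _ hxne]
            exact presF _ _ hx
          · have hds : ds.length ≤ D := hD c ds hcd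
            have h1 : (1 : Nat) ≤ (D + 2) ^ f := Nat.one_le_pow _ _ (by omega)
            have h2 : kF ≤ D * (D + 2) ^ f :=
              le_trans hkFb (Nat.mul_le_mul_right _ hds)
            calc kF + 2 ≤ D * (D + 2) ^ f + 2 * (D + 2) ^ f := by omega
              _ = (D + 2) ^ (f + 1) := by rw [pow_succ]; ring
          · intro fB S
            have e : fB + (kF + 2) = (((fB + 1) + kF) + 1) := by omega
            rw [e, pvRunB_enter, PySem.Dict.contains_eq_isSome_get?, hmc]
            simp only [Option.isSome_none, Bool.false_eq_true, if_false]
            rw [hcd]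
            dsimp only
            rw [chainF (fB + 1) (PvFrame.exits c lvl :: S), pvRunB_exit, hcd]
            dsimp only
            rw [exitF mem1 (pvPres_refl _)]
    · simp only [Option.some.injEq, Prod.mk.injEq] at h
      obtain ⟨rfl, rfl, rfl⟩ := h
      refine ⟨hmc, pvPres_refl _, 1, by omega, Nat.one_le_pow _ _ (by omega), ?_⟩
      intro fB S
      rw [pvRunB_enter, PySem.Dict.contains_eq_isSome_get?, hmc]
      simp

-- under the precondition, every loop of A returns (no fuel exhaustion, no KeyError)
theorem pvSuccFold (mem0 : PySem.Dict String Int)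
    (g : String → Int → PySem.Dict String Int → PySem.Dict Int (List String) → Option (Int × PySem.Dict String Int × PySem.Dict Int (List String)))
    (ok : String → Bool)
    (hg : ∀ d lvl mem clpl, pvPres mem0 mem → ok d = true → (g d lvl mem clpl).isSome = true)
    (hgp : ∀ d lvl mem clpl v mem' clpl', g d lvl mem clpl = some (v, mem', clpl') → pvPres mem mem') :
    ∀ (ds : List String) (lvl m0 : Int) mem clpl, pvPres mem0 mem → (∀ d ∈ ds, ok d = true) →
      (pvGoAFold g ds lvl m0 mem clpl).isSome = true := by
  intro ds
  induction ds with
  | nil => intro lvl m0 mem clpl _ _; simp [pvGoAFold]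
  | cons d rest ih =>
    intro lvl m0 mem clpl hp hall
    have hs := hg d (lvl + 1) mem clpl hp (hall d (by simp))
    rcases hgd : g d (lvl + 1) mem clpl with _ | ⟨vd, memd, clpld⟩
    · rw [hgd] at hs; simp at hs
    · rw [pvGoAFold, hgd]
      exact ih lvl (max m0 vd) memd clpld
        (fun x w hx => hgp _ _ _ _ _ _ _ hgd _ _ (hp _ _ hx))
        (fun d' hd' => hall d' (by simp [hd']))

theorem pvSuccGo (cd : PySem.Dict String (List String)) (mem0 : PySem.Dict String Int) (D : Nat)
    (hD : ∀ c ds, PySem.Dict.get? cd c = some ds → ds.length ≤ D) :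
    ∀ (f : Nat) (c : String) (lvl : Int) mem clpl, pvPres mem0 mem → (pvSafe cd mem0 f).contains c = true →
      (pvGoA cd f c lvl mem clpl).isSome = true := by
  intro f
  induction f with
  | zero => intro c lvl mem clpl _ hok; simp [pvSafe] at hok
  | succ f ihf =>
    intro c lvl mem clpl hp hok
    rw [pvGoA]
    rcases hmc : PySem.Dict.get? mem c with _ | v0 <;> dsimp only
    case some => simp
    case none =>
      have hc0 : PySem.Dict.contains mem0 c = false := by
        rw [PySem.Dict.contains_eq_isSome_get?]
        rcases h0 : PySem.Dict.get? mem0 c with _ | w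
        · rfl
        · have := hp c w h0; rw [this] at hmc; cases hmc
      rw [pvSafe] at hok
      have hok' : c ∈ (mem0.keys ++ cd.keys).filter
          (fun c => PySem.Dict.contains mem0 c || (PySem.Dict.getD cd c []).all (fun d => (pvSafe cd mem0 f).contains d)) := by
        simpa using hok
      obtain ⟨hbase, hpred⟩ := List.mem_filter.mp hok'
      rw [hc0, Bool.false_or] at hpred
      have hckey : c ∈ cd.keys := by
        rcases List.mem_append.mp hbase with h | h
        · have hcm : PySem.Dict.contains mem0 c = true := by
            rw [PySem.Dict.contains_eq_decide_mem_keys]; simpa using h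
          rw [hcm] at hc0; cases hc0
        · exact h
      cases hcd : PySem.Dict.get? cd c with
      | none =>
        have hcont : PySem.Dict.contains cd c = true := by
          rw [PySem.Dict.contains_eq_decide_mem_keys]; simpa using hckey
        have h2 := PySem.Dict.contains_eq_isSome_get? cd c
        rw [hcd, hcont] at h2
        simp at h2
      | some ds =>
        have hgd : PySem.Dict.getD cd c [] = ds := by
          rw [PySem.Dict.getD_eq_get?_getD, hcd]; rfl
        rw [hgd] at hpred
        have hall : ∀ d ∈ ds, (pvSafe cd mem0 f).contains d = true := by
          simpa [List.all_eq_true] using hpred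
        have hsf := pvSuccFold mem0 (pvGoA cd f) (fun d => (pvSafe cd mem0 f).contains d)
          (fun d lvl mem clpl hp hok => ihf d lvl mem clpl hp hok)
          (fun d lvl mem clpl v mem' clpl' h => (pvSimGo cd D hD f d lvl mem clpl v mem' clpl' h).2.1)
          ds lvl lvl mem clpl hp hall
        dsimp only
        rw [pvGuard]
        rcases hF : pvGoAFold (pvGoA cd f) ds lvl lvl mem clpl with _ | ⟨m1, mem1, clpl1⟩
        · rw [hF] at hsf; simp at hsf
        · simp

-- the fuel bound used by port B dominates every dependency-list length in the dict
theorem pvLeFoldlMax (l : List (String × List String)) : ∀ (a : Nat), a ≤ l.foldl (fun a q => max a q.2.length) a := by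
  induction l with
  | nil => intro a; simp
  | cons q rest ih =>
    intro a
    exact le_trans (Nat.le_max_left a q.2.length) (ih _)

theorem pvMemLeFoldlMax (l : List (String × List String)) : ∀ (a : Nat) (p : String × List String), p ∈ l → p.2.length ≤ l.foldl (fun a q => max a q.2.length) a := by
  induction l with
  | nil => intro a p hp; cases hp
  | cons q rest ih =>
    intro a p hp
    rcases List.mem_cons.mp hp with rfl | hp'
    · simp only [List.foldl_cons]
      exact le_trans (Nat.le_max_right a p.2.length) (pvLeFoldlMax rest _)
    · exact ih _ p hp'

theorem pvDMax_bound (cd : PySem.Dict String (List String)) :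
    ∀ c ds, PySem.Dict.get? cd c = some ds → ds.length ≤ pvDMax cd := by
  intro c ds h
  have hm : (c, ds) ∈ cd.items := PySem.Dict.mem_items_of_get?_eq_some cd h
  exact pvMemLeFoldlMax cd.items 0 (c, ds) hm

-- ===== VERDICT (by name: the statement is the Claim_ definition above) =====
theorem findCourseList_spec : Claim_equal_findCourseList := by
  unfold Claim_equal_findCourseList
  intro courses courseCode memory level courseListPerLevel _ hpre
  unfold Pre_findCourseList at hpre
  unfold Spec_findCourseList
  have hD := pvDMax_bound (PySem.Dict.ofList courses)
  have hsome := pvSuccGo (PySem.Dict.ofList courses) (PySem.Dict.ofList memory) (pvDMax (PySem.Dict.ofList courses)) hD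
    (courses.length + 1) courseCode level (PySem.Dict.ofList memory) (PySem.Dict.ofList courseListPerLevel)
    (pvPres_refl _) hpre
  rcases heq : pvGoA (PySem.Dict.ofList courses) (courses.length + 1) courseCode level (PySem.Dict.ofList memory) (PySem.Dict.ofList courseListPerLevel) with _ | ⟨v, mem', clpl'⟩
  · rw [heq] at hsome; simp at hsome
  · obtain ⟨hmem, _, k, hk0, hkb, hchain⟩ :=
      pvSimGo (PySem.Dict.ofList courses) (pvDMax (PySem.Dict.ofList courses)) hD
        (courses.length + 1) courseCode level (PySem.Dict.ofList memory) (PySem.Dict.ofList courseListPerLevel) v mem' clpl' heq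
    have hrun : pvRunB (PySem.Dict.ofList courses) ((pvDMax (PySem.Dict.ofList courses) + 2) ^ (courses.length + 1)) [PvFrame.enter courseCode level] (PySem.Dict.ofList memory) (PySem.Dict.ofList courseListPerLevel) = some (mem', clpl') := by
      have hch := hchain ((pvDMax (PySem.Dict.ofList courses) + 2) ^ (courses.length + 1) - k) []
      rw [Nat.sub_add_cancel hkb] at hch
      rw [hch, pvRunB_nil]
    unfold findCourseList findCourseList_alt
    rw [heq, hrun]
    dsimp only
    rw [PySem.Dict.getD_eq_get?_getD, hmem]
    rfl
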